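-- pv_equiv track=rewrite | github.com/limdongjin/ProblemSolving | Codeforces/Round_656/C_Make_it_Good.py | solve
-- ===== SOURCE A (Python) =====
-- def solve(a):
--     # is increasing sorted
--     if all(a[i-1] <= a[i] for i in range(1,len(a))):
--         return 0
--
--     # is decreasing sorted
--     if all(a[i-1] >= a[i] for i in range(1,len(a))):
--         return 0
--     start = 0
--     u_flag = False
--     d_flag = True
--     for i in range(len(a)-1, 0, -1):
--         if d_flag and not(a[i-1] >= a[i]):
--             u_flag = True
--             d_flag = False
--         elif u_flag and not(a[i-1] <= a[i]):
--             start = i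
--             break
--     return start
-- ===== SOURCE B (Python) =====
-- def solve(a):
--     ans = 0
--     inc_start = 0
--     for i in range(1, len(a)):
--         if a[i-1] > a[i]:
--             inc_start = i
--         elif a[i-1] < a[i]:
--             ans = inc_start
--     return ans
-- ===== Notes on version B (the rewrite author's own statement) =====
-- stated objective: simpler
-- what changed: Replaces A's two upfront all() monotonicity passes plus a backward flag-machine loop with break by a single forward left-to-right pass that tracks the start of the current non-decreasing run and records it as the answer at every strict rise.
import Mathlib
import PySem

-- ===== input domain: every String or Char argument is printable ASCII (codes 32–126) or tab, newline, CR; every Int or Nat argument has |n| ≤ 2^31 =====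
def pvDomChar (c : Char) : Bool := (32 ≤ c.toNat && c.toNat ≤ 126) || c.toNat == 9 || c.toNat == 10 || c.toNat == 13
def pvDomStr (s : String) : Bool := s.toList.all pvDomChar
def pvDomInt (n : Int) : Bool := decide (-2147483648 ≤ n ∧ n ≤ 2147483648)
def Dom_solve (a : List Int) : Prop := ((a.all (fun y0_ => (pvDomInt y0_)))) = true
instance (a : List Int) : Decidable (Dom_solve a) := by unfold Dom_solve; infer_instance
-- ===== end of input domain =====

-- B replaces A's backward flag-machine with break (plus two all() pre-checks) by ONE forward
-- left-to-right pass that tracks the start of the current non-decreasing run and records the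
-- answer at each strict rise; same O(n), a single plain loop.

-- ===== PORT A =====
-- the for-loop 'for i in range(len(a)-1, 0, -1)' with flags and break, as downward structural
-- recursion on the same state (j+1 plays the role of Python's i; break returns directly)
def solveLoopA (a : List Int) (start : Int) (u d : Bool) : Nat → Int
  | 0 => start
  | j + 1 =>
    if d = true ∧ ¬ (PySem.List.pyGetD a (j : Int) 0 ≥ PySem.List.pyGetD a ((j : Int) + 1) 0) then
      solveLoopA a start true false j
    else if u = true ∧ ¬ (PySem.List.pyGetD a (j : Int) 0 ≤ PySem.List.pyGetD a ((j : Int) + 1) 0) then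
      ((j : Int) + 1)
    else
      solveLoopA a start u d j

def solve (a : List Int) : Int :=
  if (PySem.List.pyRange 1 (a.length : Int) 1).all
      (fun i => decide (PySem.List.pyGetD a (i - 1) 0 ≤ PySem.List.pyGetD a i 0)) then 0
  else if (PySem.List.pyRange 1 (a.length : Int) 1).all
      (fun i => decide (PySem.List.pyGetD a (i - 1) 0 ≥ PySem.List.pyGetD a i 0)) then 0
  else solveLoopA a 0 false true (a.length - 1)

-- ===== PORT B =====
-- the loop body of B's single forward pass: state = (ans, inc_start)
def stepB (a : List Int) (st : Int × Int) (i : Int) : Int × Int :=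
  if PySem.List.pyGetD a (i - 1) 0 > PySem.List.pyGetD a i 0 then (st.1, i)
  else if PySem.List.pyGetD a (i - 1) 0 < PySem.List.pyGetD a i 0 then (st.2, st.2)
  else st

-- 'for i in range(1, len(a))' as a foldl over the same range, returning ans
def solve_alt (a : List Int) : Int :=
  ((PySem.List.pyRange 1 (a.length : Int) 1).foldl (stepB a) (0, 0)).1

-- ===== PRECONDITION & SPEC =====
def Spec_solve (a : List Int) (out : Int) : Prop := out = solve_alt a
instance (a : List Int) (out : Int) : Decidable (Spec_solve a out) := by unfold Spec_solve; infer_instance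

-- ===== CLAIM =====
def Claim_equal_solve : Prop := ∀ (a : List Int), Dom_solve a → Spec_solve a (solve a)

-- ===== LEMMAS AND PROOFS =====

-- proof-side characterisation of A's loop: tailLoop j = smallest i with a[i..j] non-increasing,
-- frontLoop j = smallest i with a[i..j] non-decreasing
def tailLoop (a : List Int) : Nat → Nat
  | 0 => 0
  | j + 1 => if PySem.List.pyGetD a (j : Int) 0 ≥ PySem.List.pyGetD a ((j : Int) + 1) 0
             then tailLoop a j else j + 1

def frontLoop (a : List Int) : Nat → Nat
  | 0 => 0
  | j + 1 => if PySem.List.pyGetD a (j : Int) 0 ≤ PySem.List.pyGetD a ((j : Int) + 1) 0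
             then frontLoop a j else j + 1

theorem solveLoopA_succ (a : List Int) (start : Int) (u d : Bool) (j : Nat) :
    solveLoopA a start u d (j + 1) =
      (if d = true ∧ ¬ (PySem.List.pyGetD a (j : Int) 0 ≥ PySem.List.pyGetD a ((j : Int) + 1) 0) then
        solveLoopA a start true false j
      else if u = true ∧ ¬ (PySem.List.pyGetD a (j : Int) 0 ≤ PySem.List.pyGetD a ((j : Int) + 1) 0) then
        ((j : Int) + 1)
      else solveLoopA a start u d j) := rfl

theorem tailLoop_succ (a : List Int) (j : Nat) :
    tailLoop a (j + 1) = (if PySem.List.pyGetD a (j : Int) 0 ≥ PySem.List.pyGetD a ((j : Int) + 1) 0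
      then tailLoop a j else j + 1) := rfl

theorem frontLoop_succ (a : List Int) (j : Nat) :
    frontLoop a (j + 1) = (if PySem.List.pyGetD a (j : Int) 0 ≤ PySem.List.pyGetD a ((j : Int) + 1) 0
      then frontLoop a j else j + 1) := rfl

-- A's loop in the u-phase computes frontLoop
theorem lemU (a : List Int) : ∀ j : Nat, solveLoopA a 0 true false j = ((frontLoop a j : Nat) : Int) := by
  intro j
  induction j with
  | zero => simp [solveLoopA, frontLoop]
  | succ j ih =>
    rw [solveLoopA_succ, frontLoop_succ, if_neg (by simp)]
    by_cases h : PySem.List.pyGetD a (j : Int) 0 ≤ PySem.List.pyGetD a ((j : Int) + 1) 0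
    · rw [if_neg (fun hc => hc.2 h), if_pos h]; exact ih
    · rw [if_pos ⟨rfl, h⟩, if_neg h]; norm_cast

-- A's loop from the d-phase computes frontLoop ∘ tailLoop
theorem lemD (a : List Int) : ∀ j : Nat,
    solveLoopA a 0 false true j = ((frontLoop a (tailLoop a j) : Nat) : Int) := by
  intro j
  induction j with
  | zero => simp [solveLoopA, tailLoop, frontLoop]
  | succ j ih =>
    rw [solveLoopA_succ, tailLoop_succ]
    by_cases h : PySem.List.pyGetD a (j : Int) 0 ≥ PySem.List.pyGetD a ((j : Int) + 1) 0
    · rw [if_neg (fun hc => hc.2 h), if_neg (by simp), if_pos h]; exact ih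
    · rw [if_pos ⟨rfl, h⟩, if_neg h, lemU a j]
      have hfl : frontLoop a (j + 1) = frontLoop a j := by
        rw [frontLoop_succ, if_pos (le_of_not_ge h)]
      rw [hfl]

-- B's single forward fold maintains exactly (frontLoop (tailLoop j), frontLoop j)
theorem lemB (a : List Int) : ∀ j : Nat,
    (PySem.List.pyRange 1 ((j : Int) + 1) 1).foldl (stepB a) (0, 0) =
      (((frontLoop a (tailLoop a j) : Nat) : Int), ((frontLoop a j : Nat) : Int)) := by
  intro j
  induction j with
  | zero =>
    rw [show ((0 : Nat) : Int) + 1 = 1 by norm_num, PySem.List.pyRange_one_eq_nil (le_refl 1)]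
    simp [tailLoop, frontLoop]
  | succ j ih =>
    have hsplit : PySem.List.pyRange 1 (((j + 1 : Nat) : Int) + 1) 1 =
        PySem.List.pyRange 1 ((j : Int) + 1) 1 ++ [(j : Int) + 1] := by
      push_cast
      exact PySem.List.pyRange_one_succ_right (by omega)
    rw [hsplit, List.foldl_append, ih]
    show stepB a _ _ = _
    unfold stepB
    have hidx : (j : Int) + 1 - 1 = (j : Int) := by ring
    rw [hidx, tailLoop_succ, frontLoop_succ]
    split_ifs with c1 c2 c3 c4 <;>
      first
        | rfl
        | (exfalso; omega)
        | (simp only [Prod.mk.injEq]; omega)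
        | (rw [frontLoop_succ, if_pos (by omega)])

theorem tailLoop_le (a : List Int) : ∀ j : Nat, tailLoop a j ≤ j := by
  intro j
  induction j with
  | zero => simp [tailLoop]
  | succ j ih =>
    rw [tailLoop_succ]
    split <;> omega

theorem frontLoop_zero_of_nondec (a : List Int)
    (H : ∀ j : Nat, j + 1 < a.length → PySem.List.pyGetD a (j : Int) 0 ≤ PySem.List.pyGetD a ((j : Int) + 1) 0) :
    ∀ j : Nat, j + 1 ≤ a.length → frontLoop a j = 0 := by
  intro j
  induction j with
  | zero => intro _; simp [frontLoop]
  | succ j ih =>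
    intro hj
    have h := H j (by omega)
    rw [frontLoop_succ, if_pos h]
    exact ih (by omega)

theorem tailLoop_zero_of_noninc (a : List Int)
    (H : ∀ j : Nat, j + 1 < a.length → PySem.List.pyGetD a (j : Int) 0 ≥ PySem.List.pyGetD a ((j : Int) + 1) 0) :
    ∀ j : Nat, j + 1 ≤ a.length → tailLoop a j = 0 := by
  intro j
  induction j with
  | zero => intro _; simp [tailLoop]
  | succ j ih =>
    intro hj
    have h := H j (by omega)
    rw [tailLoop_succ, if_pos h]
    exact ih (by omega)

-- convert the boolean all() check over range(1, len(a)) into a ∀ over adjacent Nat indices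
theorem all_check_iff (a : List Int) (cmp : Int → Int → Prop) [inst : ∀ x y : Int, Decidable (cmp x y)]
    (h : (PySem.List.pyRange 1 (a.length : Int) 1).all
      (fun i => decide (cmp (PySem.List.pyGetD a (i - 1) 0) (PySem.List.pyGetD a i 0))) = true) :
    ∀ j : Nat, j + 1 < a.length → cmp (PySem.List.pyGetD a (j : Int) 0) (PySem.List.pyGetD a ((j : Int) + 1) 0) := by
  intro j hj
  rw [List.all_eq_true] at h
  have := h ((j : Int) + 1) (by
    rw [PySem.List.mem_pyRange_one]
    constructor <;> [omega; exact_mod_cast (by omega : (j : Int) + 1 < (a.length : Int))])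
  rw [show (j : Int) + 1 - 1 = (j : Int) by ring] at this
  exact of_decide_eq_true this

-- B's result as frontLoop ∘ tailLoop at len(a)-1
theorem solve_alt_eq (a : List Int) :
    solve_alt a = ((frontLoop a (tailLoop a (a.length - 1)) : Nat) : Int) := by
  unfold solve_alt
  rcases Nat.eq_zero_or_pos a.length with h0 | h0
  · rw [h0]
    rw [PySem.List.pyRange_one_eq_nil (by norm_num)]
    simp [tailLoop, frontLoop]
  · have hn : (a.length : Int) = ((a.length - 1 : Nat) : Int) + 1 := by omega
    rw [hn, lemB a (a.length - 1)]

-- ===== VERDICT =====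
theorem solve_spec : Claim_equal_solve := by
  intro a _
  unfold Spec_solve solve
  rw [solve_alt_eq]
  split_ifs with h1 h2
  · -- non-decreasing: B also returns 0
    rcases Nat.eq_zero_or_pos a.length with h0 | h0
    · have he : a.length - 1 = 0 := by omega
      rw [he]; simp [tailLoop, frontLoop]
    · have H := all_check_iff a (fun x y => x ≤ y) h1
      have htail := tailLoop_le a (a.length - 1)
      have : frontLoop a (tailLoop a (a.length - 1)) = 0 :=
        frontLoop_zero_of_nondec a H _ (by omega)
      simp [this]
  · -- non-increasing: B also returns 0
    rcases Nat.eq_zero_or_pos a.length with h0 | h0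
    · have he : a.length - 1 = 0 := by omega
      rw [he]; simp [tailLoop, frontLoop]
    · have H := all_check_iff a (fun x y => x ≥ y) h2
      have : tailLoop a (a.length - 1) = 0 :=
        tailLoop_zero_of_noninc a H _ (by omega)
      simp [this, frontLoop]
  · exact lemD a (a.length - 1)
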